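-- pv_equiv track=rewrite | github.com/jgfranco/formation | risingTideWinner.py | risingTideWinner
-- ===== SOURCE A (Python) =====
-- def risingTideWinner(nominations):
--
--     tally = {}
--     risingTideWinner = (None, float("-inf"))
--     for nom in nominations:
--
--         tally[nom] = count =  tally.get(nom, 0) +1
--
--         if count >  risingTideWinner[1]:
--             risingTideWinner = (nom, count)
--
--     return risingTideWinner[0]
-- ===== SOURCE B (Python) =====
-- def risingTideWinner(nominations):
--     counts = {}
--     for nom in nominations:
--         counts[nom] = counts.get(nom, 0) + 1
--     if not nominations:
--         return None
--     target = max(counts.values())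
--     running = {}
--     for nom in nominations:
--         running[nom] = c = running.get(nom, 0) + 1
--         if c == target:
--             return nom
-- ===== Notes on version B (the rewrite author's own statement) =====
-- stated objective: alternative
-- what changed: B replaces A's single pass with a running max by two phases: build the complete frequency table, take its maximum M, then rescan with a fresh tally and return the first nomination whose running count reaches M (first-to-reach-max, exactly A's tie-break).
import Mathlib
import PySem

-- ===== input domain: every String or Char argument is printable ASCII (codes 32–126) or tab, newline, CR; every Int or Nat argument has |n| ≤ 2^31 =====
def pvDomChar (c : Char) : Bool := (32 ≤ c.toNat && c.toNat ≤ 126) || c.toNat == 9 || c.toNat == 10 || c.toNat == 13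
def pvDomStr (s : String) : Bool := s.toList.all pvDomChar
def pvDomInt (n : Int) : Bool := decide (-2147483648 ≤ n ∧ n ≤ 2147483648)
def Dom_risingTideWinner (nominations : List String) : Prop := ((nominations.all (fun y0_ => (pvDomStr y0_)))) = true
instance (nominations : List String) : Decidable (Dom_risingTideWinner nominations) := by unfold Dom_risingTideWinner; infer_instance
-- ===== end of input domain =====

-- B rebuilds the answer in two phases (full frequency table, then a first-to-reach-max rescan)
-- instead of A's single pass with a running maximum; same result, proved equivalent.

-- ===== PORT A =====
-- A's winner tuple starts as (None, float("-inf")); modelled as Option (String × Int):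
-- 'none' is the initial (None, -inf) state, where 'count > -inf' is always true — exact.
def pvStepA (st : PySem.Dict String Int × Option (String × Int)) (nom : String) :
    PySem.Dict String Int × Option (String × Int) :=
  let count := st.1.getD nom 0 + 1
  let tally := st.1.insert nom count
  match st.2 with
  | none => (tally, some (nom, count))
  | some (w, b) => if count > b then (tally, some (nom, count)) else (tally, some (w, b))

def risingTideWinner (nominations : List String) : Option String :=
  match (nominations.foldl pvStepA (PySem.Dict.empty, none)).2 with
  | none => none
  | some (w, _) => some w

-- ===== PORT B =====
-- first counting loop of B
def pvCountB (nominations : List String) : PySem.Dict String Int :=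
  nominations.foldl (fun c nom => c.insert nom (c.getD nom 0 + 1)) PySem.Dict.empty

-- second loop of B: fresh running tally, return first nom whose running count hits target
def pvFindB (nominations : List String) (running : PySem.Dict String Int) (target : Int) :
    Option String :=
  match nominations with
  | [] => none
  | nom :: rest =>
    let c := running.getD nom 0 + 1
    if c = target then some nom else pvFindB rest (running.insert nom c) target

def risingTideWinner_alt (nominations : List String) : Option String :=
  let counts := pvCountB nominations
  match nominations with
  | [] => none
  | _ :: _ =>
    match PySem.List.max? counts.values (fun v => v) with
    | none => none  -- unreachable: counts is nonempty when nominations is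
    | some target => pvFindB nominations PySem.Dict.empty target

-- ===== PRECONDITION & SPEC =====
def Spec_risingTideWinner (nominations : List String) (out : Option String) : Prop := out = risingTideWinner_alt nominations
instance (nominations : List String) (out : Option String) : Decidable (Spec_risingTideWinner nominations out) := by unfold Spec_risingTideWinner; infer_instance

-- ===== CLAIM (what is proved, stated in full; the proofs are below) =====
def Claim_equal_risingTideWinner : Prop := ∀ (nominations : List String), Dom_risingTideWinner nominations → Spec_risingTideWinner nominations (risingTideWinner nominations)

-- ===== LEMMAS AND PROOFS =====

theorem pvCountB_getD (l : List String) (x : String) :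
    (pvCountB l).getD x 0 = l.count x := by
  simp [pvCountB, PySem.Dict.getD_foldl_insert_add_one, PySem.Dict.getD_empty]

theorem pvCountB_append_singleton (p : List String) (x : String) :
    pvCountB (p ++ [x]) = (pvCountB p).insert x ((pvCountB p).getD x 0 + 1) := by
  simp [pvCountB, List.foldl_append]

theorem pvFindB_append (p s : List String) (t : PySem.Dict String Int) (M : Int) :
    pvFindB (p ++ s) t M =
      match pvFindB p t M with
      | some w => some w
      | none => pvFindB s (p.foldl (fun c nom => c.insert nom (c.getD nom 0 + 1)) t) M := by
  induction p generalizing t with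
  | nil => simp [pvFindB]
  | cons x rest ih =>
    simp only [List.cons_append, pvFindB, List.foldl_cons]
    split_ifs with h
    · rfl
    · exact ih _

theorem pvFindB_none (p : List String) (t : PySem.Dict String Int) (M : Int)
    (h : ∀ x, t.getD x 0 + p.count x < M) : pvFindB p t M = none := by
  induction p generalizing t with
  | nil => rfl
  | cons x rest ih =>
    have hx := h x
    rw [List.count_cons_self] at hx
    simp only [pvFindB]
    rw [if_neg (by omega)]
    refine ih _ (fun y => ?_)
    by_cases hyx : y = x
    · subst hyx
      rw [PySem.Dict.getD_insert_self]
      omega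
    · rw [PySem.Dict.getD_insert_of_ne _ _ _ hyx]
      have := h y
      simp only [List.count_cons, beq_iff_eq] at this
      omega

theorem pvFindB_some_le (p : List String) (t : PySem.Dict String Int) (M : Int) (w : String)
    (h : pvFindB p t M = some w) : M ≤ t.getD w 0 + p.count w := by
  induction p generalizing t with
  | nil => simp [pvFindB] at h
  | cons x rest ih =>
    simp only [pvFindB] at h
    split_ifs at h with hc
    · cases h
      simp only [List.count_cons_self]
      push_cast
      omega
    · have := ih _ h
      by_cases hwx : w = x
      · subst hwx
        rw [PySem.Dict.getD_insert_self] at this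
        simp only [List.count_cons_self]
        push_cast
        omega
      · rw [PySem.Dict.getD_insert_of_ne _ _ _ hwx] at this
        simp only [List.count_cons, beq_iff_eq]
        omega

-- the main invariant: A's fold over the suffix s, started after prefix p with best (w, b),
-- preserves "b bounds all counts so far" and "w is what B's rescan finds at target b"
theorem pvMain (s : List String) : ∀ (p : List String) (w : String) (b : Int),
    (∀ x, p.count x ≤ b) →
    pvFindB p PySem.Dict.empty b = some w →
    1 ≤ b →
    ∃ w' b', s.foldl pvStepA (pvCountB p, some (w, b)) = (pvCountB (p ++ s), some (w', b')) ∧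
      (∀ x, (p ++ s).count x ≤ b') ∧
      pvFindB (p ++ s) PySem.Dict.empty b' = some w' ∧
      1 ≤ b' := by
  induction s with
  | nil =>
    intro p w b h1 hw hb
    exact ⟨w, b, by simp, by simpa using h1, by simpa using hw, hb⟩
  | cons x s' ih =>
    intro p w b h1 hw hb
    have hcnt : (pvCountB p).getD x 0 + 1 = p.count x + 1 := by rw [pvCountB_getD]
    have hstep : ∀ st2, List.foldl pvStepA (pvCountB p, st2) (x :: s') =
        List.foldl pvStepA (pvStepA (pvCountB p, st2) x) s' := fun _ => rfl
    by_cases hlt : (p.count x : Int) + 1 > b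
    · -- A updates its best to (x, p.count x + 1)
      have hstepA : pvStepA (pvCountB p, some (w, b)) x
          = (pvCountB (p ++ [x]), some (x, (p.count x : Int) + 1)) := by
        simp only [pvStepA, hcnt, pvCountB_append_singleton]
        rw [if_pos (by simpa [pvCountB_getD] using hlt)]
      have h1' : ∀ y, ((p ++ [x]).count y : Int) ≤ (p.count x : Int) + 1 := by
        intro y
        by_cases hyx : y = x
        · rw [hyx, List.count_append, List.count_singleton]
          push_cast
          have := h1 x
          omega
        · have := h1 y
          rw [List.count_append, List.count_singleton', if_neg (Ne.symm hyx)]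
          push_cast
          omega
      have hw' : pvFindB (p ++ [x]) PySem.Dict.empty ((p.count x : Int) + 1) = some x := by
        rw [pvFindB_append]
        have hnone : pvFindB p PySem.Dict.empty ((p.count x : Int) + 1) = none := by
          refine pvFindB_none _ _ _ (fun y => ?_)
          have := h1 y
          rw [PySem.Dict.getD_empty]
          omega
        rw [hnone]
        show pvFindB [x] (pvCountB p) _ = _
        simp [pvFindB, pvCountB_getD]
      obtain ⟨w', b', hfold, hb1, hfind, hbpos⟩ :=
        ih (p ++ [x]) x ((p.count x : Int) + 1) h1' hw' (by omega)
      refine ⟨w', b', ?_, ?_, ?_, hbpos⟩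
      · rw [hstep, hstepA, hfold, List.append_assoc]; rfl
      · intro y; have := hb1 y; rwa [List.append_assoc] at this
      · rwa [List.append_assoc] at hfind
    · -- A keeps (w, b)
      have hstepA : pvStepA (pvCountB p, some (w, b)) x
          = (pvCountB (p ++ [x]), some (w, b)) := by
        simp only [pvStepA, pvCountB_append_singleton]
        rw [if_neg (by simpa [pvCountB_getD] using hlt)]
      have h1' : ∀ y, ((p ++ [x]).count y : Int) ≤ b := by
        intro y
        by_cases hyx : y = x
        · rw [hyx, List.count_append, List.count_singleton]
          push_cast
          have := h1 x
          omega
        · have := h1 y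
          rw [List.count_append, List.count_singleton', if_neg (Ne.symm hyx)]
          push_cast
          omega
      have hw' : pvFindB (p ++ [x]) PySem.Dict.empty b = some w := by
        rw [pvFindB_append, hw]
      obtain ⟨w', b', hfold, hb1, hfind, hbpos⟩ := ih (p ++ [x]) w b h1' hw' hb
      refine ⟨w', b', ?_, ?_, ?_, hbpos⟩
      · rw [hstep, hstepA, hfold, List.append_assoc]; rfl
      · intro y; have := hb1 y; rwa [List.append_assoc] at this
      · rwa [List.append_assoc] at hfind

-- ===== VERDICT (by name: the statement is the Claim_ definition above) =====
theorem risingTideWinner_spec : Claim_equal_risingTideWinner := by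
  unfold Claim_equal_risingTideWinner
  intro noms _
  unfold Spec_risingTideWinner
  cases noms with
  | nil => rfl
  | cons x rest =>
    -- first step of A's loop, from (∅, none)
    have hfirst : pvStepA (PySem.Dict.empty, none) x = (pvCountB [x], some (x, 1)) := by
      simp [pvStepA, pvCountB, PySem.Dict.getD_empty]
    obtain ⟨w', b', hfold, hbd, hfind, hbpos⟩ :=
      pvMain rest [x] x 1
        (by
          intro y
          rw [List.count_singleton']
          split_ifs <;> simp)
        (by simp [pvFindB, PySem.Dict.getD_empty])
        le_rfl
    have hA : risingTideWinner (x :: rest) = some w' := by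
      unfold risingTideWinner
      rw [show List.foldl pvStepA (PySem.Dict.empty, none) (x :: rest)
            = List.foldl pvStepA (pvCountB [x], some (x, 1)) rest from by rw [← hfirst]; rfl,
          hfold]
    -- B's side: the max of the counter's values is exactly b'
    have hcounter : pvCountB (x :: rest) = PySem.Dict.counter (x :: rest) := by
      rw [pvCountB, PySem.Dict.foldl_insert_getD_add_one_eq_counter]
    have hvals : (pvCountB (x :: rest)).values
        = (PySem.Set.ofList (x :: rest)).map (fun k => ((x :: rest).count k : Int)) := by
      rw [hcounter]
      show (PySem.Dict.counter (x :: rest)).items.map (·.2) = _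
      rw [PySem.Dict.items_counter, List.map_map]
      rfl
    have hvne : (pvCountB (x :: rest)).values ≠ [] := by
      rw [hvals]
      simp only [ne_eq, List.map_eq_nil_iff]
      intro hnil
      have : x ∈ PySem.Set.ofList (x :: rest) := by
        exact (PySem.Set.mem_ofList _ _).mpr List.mem_cons_self
      rw [hnil] at this
      exact absurd this (List.not_mem_nil)
    obtain ⟨M, hM⟩ : ∃ M, PySem.List.max? (pvCountB (x :: rest)).values (fun v => v) = some M := by
      rcases h : PySem.List.max? (pvCountB (x :: rest)).values (fun v => v) with _ | M
      · exact absurd ((PySem.List.max?_eq_none_iff _ _).mp h) hvne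
      · exact ⟨M, rfl⟩
    have hMmem : M ∈ (pvCountB (x :: rest)).values := PySem.List.max?_mem hM
    have hMmax : ∀ y ∈ (pvCountB (x :: rest)).values, y ≤ M := PySem.List.max?_isMax hM
    -- M ≤ b' : M is the count of some element, and b' bounds all counts
    have hMle : M ≤ b' := by
      rw [hvals] at hMmem
      obtain ⟨k, _, hk⟩ := List.mem_map.mp hMmem
      rw [← hk]; exact hbd k
    -- b' ≤ M : w' reaches count b', so b' ≤ count w', a value bounded by M
    have hwcnt : b' ≤ ((x :: rest).count w' : Int) := by
      have := pvFindB_some_le _ _ _ _ hfind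
      rwa [PySem.Dict.getD_empty, zero_add] at this
    have hwmem : w' ∈ (x :: rest) := by
      by_contra hnm
      rw [List.count_eq_zero_of_not_mem hnm] at hwcnt
      omega
    have hbleM : b' ≤ M := by
      refine le_trans hwcnt (hMmax _ ?_)
      rw [hvals]
      exact List.mem_map.mpr ⟨w', (PySem.Set.mem_ofList _ _).mpr hwmem, rfl⟩
    have hMb : M = b' := le_antisymm hMle hbleM
    rw [hA]
    show _ = risingTideWinner_alt (x :: rest)
    unfold risingTideWinner_alt
    simp only [hM, hMb]
    exact hfind.symm
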